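-- pv_equiv track=rewrite | github.com/huggingface/transformers | pytorch_transformers/tests/regression_test_tokenization_with_offsets.py | ignore_variations
-- ===== SOURCE A (Python) =====
-- def ignore_variations(tokens):
--     # xlnet can tokenize '111' as '1', '11' or '11', '1'
--     # merge tokens that are all one character to not report this error
--     merged_tokens = []
--     prev_char_set = None
--     for t in tokens:
--         char_set = set(t)
--         if prev_char_set and len(prev_char_set) == 1 and prev_char_set == char_set:
--             merged_tokens[-1] = merged_tokens[-1] + t
--         else:
--             merged_tokens.append(t)
--         prev_char_set = char_set
--     return merged_tokens
-- ===== SOURCE B (Python) =====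
-- def ignore_variations(tokens):
--     # group-then-join: key each token by its single repeated character (or None),
--     # find each maximal run of adjacent equal non-None keys, and join each run at once
--     keys = [t[0] if t and len(set(t)) == 1 else None for t in tokens]
--     out = []
--     n = len(tokens)
--     i = 0
--     while i < n:
--         j = i + 1
--         if keys[i] is not None:
--             while j < n and keys[j] == keys[i]:
--                 j += 1
--         out.append(''.join(tokens[i:j]))
--         i = j
--     return out
-- ===== Notes on version B (the rewrite author's own statement) =====
-- stated objective: alternative
-- what changed: Replaces A's running prev_char_set state machine that mutates the last output element with a group-then-join pass: each token is keyed by its single repeated character (or None), maximal adjacent runs of equal non-None keys are collected, and each run is joined at once.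
import Mathlib
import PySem

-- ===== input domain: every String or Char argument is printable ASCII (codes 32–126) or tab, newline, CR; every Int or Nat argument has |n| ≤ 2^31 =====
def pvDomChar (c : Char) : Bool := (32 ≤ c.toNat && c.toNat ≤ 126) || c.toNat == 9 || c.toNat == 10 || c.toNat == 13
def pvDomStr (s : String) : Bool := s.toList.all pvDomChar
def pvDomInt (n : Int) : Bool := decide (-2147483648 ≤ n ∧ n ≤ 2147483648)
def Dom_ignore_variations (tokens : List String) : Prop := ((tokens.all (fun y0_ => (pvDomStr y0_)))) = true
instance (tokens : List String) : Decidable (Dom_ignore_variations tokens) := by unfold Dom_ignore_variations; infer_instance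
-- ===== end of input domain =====

-- B replaces A's running prev_char_set state machine by a group-then-join pass
-- (key each token by its repeated character, collect maximal runs, join each run);
-- objective: alternative decomposition, same asymptotic cost.

-- ===== PORT A =====
-- one loop step of A: state = (merged_tokens, prev_char_set); 'prev_char_set and …'
-- is Python truthiness: None and the empty set are falsy (p.length ≠ 0).
-- 'merged_tokens[-1] = merged_tokens[-1] + t' replaces the last element, which the
-- branch guarantees exists (prev_char_set nonempty ⇒ a token was appended before):
-- ported as dropLast ++ [getLastD "" ++ t], exact there.
def pvStepA (st : List String × Option (PySem.Set Char)) (t : String) :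
    List String × Option (PySem.Set Char) :=
  let char_set : PySem.Set Char := PySem.Set.ofList t.toList
  match st.2 with
  | some p =>
      if p.length ≠ 0 ∧ p.length = 1 ∧ PySem.Set.equal p char_set then
        (st.1.dropLast ++ [st.1.getLastD "" ++ t], some char_set)
      else
        (st.1 ++ [t], some char_set)
  | none => (st.1 ++ [t], some char_set)

def ignore_variations (tokens : List String) : List String :=
  (tokens.foldl pvStepA ([], none)).1

-- ===== PORT B =====
-- key of a token: its first character if it is a nonempty run of one character, else None
def pvKey (t : String) : Option Char :=
  if t.toList ≠ [] ∧ (PySem.Set.ofList t.toList).length = 1 then t.toList.head? else none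

-- Source B's inner while loop: advance j past the adjacent keys equal to k
def pvRunEnd (keys : List (Option Char)) (n : Nat) (k : Option Char) (j : Nat) : Nat :=
  if h : j < n ∧ keys.getD j none == k then pvRunEnd keys n k (j + 1) else j
  termination_by n - j
  decreasing_by omega

-- the inner loop never moves j backwards (termination fact for the outer loop)
theorem pvRunEnd_ge (keys : List (Option Char)) (n : Nat) (k : Option Char) (j : Nat) :
    j ≤ pvRunEnd keys n k j := by
  fun_induction pvRunEnd <;> omega

-- Source B's outer while loop: i is the start of the current run, j its end;
-- ''.join(tokens[i:j]) is PySem.Str.join of the PySem slice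
def pvLoopB (tokens : List String) (keys : List (Option Char)) (n : Nat) (i : Nat) :
    List String :=
  if h : i < n then
    let j := if (keys.getD i none).isSome then pvRunEnd keys n (keys.getD i none) (i + 1)
             else i + 1
    PySem.Str.join "" (PySem.List.slice tokens (some (i : Int)) (some (j : Int))) ::
      pvLoopB tokens keys n j
  else []
  termination_by n - i
  decreasing_by
    have := pvRunEnd_ge keys n (keys.getD i none) (i + 1)
    split <;> omega

def ignore_variations_alt (tokens : List String) : List String :=
  pvLoopB tokens (tokens.map (fun t => pvKey t)) tokens.length 0

-- ===== PRECONDITION & SPEC =====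
def Spec_ignore_variations (tokens : List String) (out : List String) : Prop := out = ignore_variations_alt tokens
instance (tokens : List String) (out : List String) : Decidable (Spec_ignore_variations tokens out) := by unfold Spec_ignore_variations; infer_instance

-- ===== CLAIM (what is proved, stated in full; the proofs are below) =====
def Claim_equal_ignore_variations : Prop := ∀ (tokens : List String), Dom_ignore_variations tokens → Spec_ignore_variations tokens (ignore_variations tokens)

-- ===== LEMMAS AND PROOFS =====

-- proof-side reformulation of B: the keyed list and the list-structured grouping loop
def pvKeyed (tokens : List String) : List (String × Option Char) :=
  tokens.map (fun t => (t, pvKey t))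

def pvGroup : List (String × Option Char) → List String
  | [] => []
  | (t, k) :: rest =>
    let run : List (String × Option Char) :=
      match k with
      | none => []
      | some c => rest.takeWhile (fun p => p.2 == some c)
    (t ++ PySem.Str.join "" (run.map Prod.fst)) :: pvGroup (rest.drop run.length)
  termination_by l => l.length
  decreasing_by simp [List.length_drop]

-- the key a char-set determines: its unique element when it is a singleton
def pvKOf (P : List Char) : Option Char :=
  if P.length = 1 then P.head? else none

theorem pvKOf_eq_some {P : List Char} {c : Char} : pvKOf P = some c ↔ P = [c] := by
  unfold pvKOf
  constructor
  · intro h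
    split at h
    · rename_i hlen
      obtain ⟨a, rfl⟩ := List.length_eq_one_iff.mp hlen
      simpa using h
    · simp at h
  · rintro rfl; simp

theorem pvKey_eq (t : String) : pvKey t = pvKOf (PySem.Set.ofList t.toList) := by
  unfold pvKey pvKOf
  cases h : t.toList with
  | nil => simp [PySem.Set.ofList]
  | cons a l =>
    rw [PySem.Set.ofList_cons]
    by_cases hl : (a :: (PySem.Set.ofList l).discard a).length = 1
    · simp [hl]
    · have hne : (a :: l) ≠ [] := by simp
      simp only [hl]
      simp

theorem pv_nodup_eq_singleton {C : List Char} {c : Char} (hnd : C.Nodup)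
    (hmem : ∀ x, x ∈ C ↔ x ∈ [c]) : C = [c] := by
  cases C with
  | nil => have := (hmem c).mpr (by simp); simp at this
  | cons a r =>
    have ha : a = c := by have := (hmem a).mp (by simp); simpa using this
    subst ha
    cases r with
    | nil => rfl
    | cons b s =>
      have hb : b = a := by have := (hmem b).mp (by simp); simpa using this
      subst hb
      simp at hnd

-- A's merge condition holds iff both char-set keys are the same non-None key
theorem pvCond_iff (P : PySem.Set Char) (t : String) :
    (P.length ≠ 0 ∧ P.length = 1 ∧ PySem.Set.equal P (PySem.Set.ofList t.toList)) ↔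
      (∃ c, pvKOf P = some c ∧ pvKey t = some c) := by
  constructor
  · rintro ⟨-, hlen, heq⟩
    obtain ⟨p0, rfl⟩ := List.length_eq_one_iff.mp hlen
    refine ⟨p0, by simp [pvKOf], ?_⟩
    rw [pvKey_eq]
    have hmem := (PySem.Set.equal_iff _ _).mp heq
    have : PySem.Set.ofList t.toList = [p0] :=
      pv_nodup_eq_singleton (PySem.Set.nodup_ofList _) (fun x => (hmem x).symm)
    rw [this]; simp [pvKOf]
  · rintro ⟨c, hP, ht⟩
    have hP' : P = [c] := pvKOf_eq_some.mp hP
    have ht' : PySem.Set.ofList t.toList = [c] := by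
      rw [pvKey_eq] at ht; exact pvKOf_eq_some.mp ht
    subst hP'
    refine ⟨by simp, by simp, ?_⟩
    rw [ht']
    exact (PySem.Set.equal_iff _ _).mpr (fun x => Iff.rfl)

theorem pv_intercalate_nil (xs : List (List Char)) :
    List.intercalate ([] : List Char) xs = xs.flatten := by
  induction xs with
  | nil => rfl
  | cons h t ih => cases t <;> simp_all [List.intercalate, List.intersperse]

theorem pvJoin_nil : PySem.Str.join "" [] = "" := rfl

theorem pvJoin_cons (x : String) (xs : List String) :
    PySem.Str.join "" (x :: xs) = x ++ PySem.Str.join "" xs := by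
  simp only [PySem.Str.join]
  show String.ofList (PySem.Chars.join "".toList (x.toList :: xs.map String.toList)) = _
  show String.ofList (List.intercalate [] (x.toList :: xs.map String.toList)) = _
  rw [pv_intercalate_nil, List.flatten_cons, String.ofList_append, String.ofList_toList,
      ← pv_intercalate_nil]
  rfl

-- one unrolled step of B's grouping loop
def pvGroupFrom (acc : String) (k : Option Char) (l : List (String × Option Char)) :
    List String :=
  let run : List (String × Option Char) :=
    match k with
    | none => []
    | some c => l.takeWhile (fun p => p.2 == some c)
  (acc ++ PySem.Str.join "" (run.map Prod.fst)) :: pvGroup (l.drop run.length)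

theorem pvGroup_nil : pvGroup [] = [] := by
  rw [pvGroup.eq_def]

theorem pvGroup_cons (t : String) (k : Option Char) (rest : List (String × Option Char)) :
    pvGroup ((t, k) :: rest) = pvGroupFrom t k rest := by
  rw [pvGroup.eq_def]; rfl

theorem pvKeyed_cons (t : String) (r : List String) :
    pvKeyed (t :: r) = (t, pvKey t) :: pvKeyed r := rfl

theorem pvGroupFrom_nil (acc : String) (k : Option Char) :
    pvGroupFrom acc k [] = [acc] := by
  cases k <;> simp [pvGroupFrom, pvGroup_nil, pvJoin_nil, String.append_empty]

-- the main invariant: A's fold from state (ms ++ [acc], some P) produces ms followed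
-- by B's grouping of the rest, seeded with the pending piece acc and key pvKOf P
theorem pvMain (rest : List String) :
    ∀ (ms : List String) (acc : String) (P : PySem.Set Char),
      (rest.foldl pvStepA (ms ++ [acc], some P)).1 =
        ms ++ pvGroupFrom acc (pvKOf P) (pvKeyed rest) := by
  induction rest with
  | nil => intro ms acc P; simp [pvKeyed, pvGroupFrom_nil]
  | cons t r ih =>
    intro ms acc P
    rw [List.foldl_cons]
    by_cases hcond :
        (P.length ≠ 0 ∧ P.length = 1 ∧ PySem.Set.equal P (PySem.Set.ofList t.toList))
    · obtain ⟨c, hP, ht⟩ := (pvCond_iff P t).mp hcond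
      have hstep : pvStepA (ms ++ [acc], some P) t =
          (ms ++ [acc ++ t], some (PySem.Set.ofList t.toList)) := by
        simp only [pvStepA, hcond]
        simp
      rw [hstep, ih]
      have hkC : pvKOf (PySem.Set.ofList t.toList) = some c := by
        rw [← pvKey_eq]; exact ht
      -- unfold both pvGroupFrom with key some c
      simp only [pvKeyed, List.map_cons, pvGroupFrom, hP, hkC, ht]
      simp only [List.takeWhile_cons, beq_self_eq_true, if_pos, List.map_cons,
        pvJoin_cons, List.length_cons, List.drop_succ_cons]
      rw [← String.append_assoc]
    · have hstep : pvStepA (ms ++ [acc], some P) t =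
          ((ms ++ [acc]) ++ [t], some (PySem.Set.ofList t.toList)) := by
        simp only [pvStepA, hcond]
        simp
      rw [hstep, ih, ← pvKey_eq]
      have hrhs : pvGroupFrom acc (pvKOf P) (pvKeyed (t :: r)) =
          acc :: pvGroup (pvKeyed (t :: r)) := by
        cases hk : pvKOf P with
        | none => simp [pvGroupFrom, pvJoin_nil, String.append_empty]
        | some c =>
          have hne : pvKey t ≠ some c := by
            intro h
            exact hcond ((pvCond_iff P t).mpr ⟨c, hk, h⟩)
          simp only [pvGroupFrom, pvKeyed, List.map_cons, List.takeWhile_cons]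
          rw [if_neg (by simpa using hne)]
          simp [pvJoin_nil, String.append_empty]
      rw [hrhs, pvKeyed_cons, pvGroup_cons]
      simp

-- the inner loop computes start + length of the takeWhile run of equal keys
theorem pvRunEnd_eq (keys : List (Option Char)) (k : Option Char) (j : Nat) :
    pvRunEnd keys keys.length k j =
      j + ((keys.drop j).takeWhile (fun x => x == k)).length := by
  fun_induction pvRunEnd with
  | case1 j h ih =>
    obtain ⟨hj, hk⟩ := h
    have hget : keys.getD j none = keys[j] := by
      simp [List.getD_eq_getElem?_getD, hj]
    rw [hget] at hk
    rw [ih, List.drop_eq_getElem_cons hj, List.takeWhile_cons, hk]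
    simp
    omega
  | case2 j h =>
    by_cases hj : j < keys.length
    · have hk : (keys.getD j none == k) = false := by
        by_contra hc
        exact h ⟨hj, by revert hc; cases (keys.getD j none == k) <;> simp⟩
      have hget : keys.getD j none = keys[j] := by
        simp [List.getD_eq_getElem?_getD, hj]
      rw [hget] at hk
      rw [List.drop_eq_getElem_cons hj, List.takeWhile_cons, hk]
      simp
    · rw [List.drop_eq_nil_of_le (by omega)]
      simp

-- a takeWhile-prefix is a take of its own length
theorem pv_takeWhile_eq_take {α : Type} (p : α → Bool) (l : List α) :
    l.takeWhile p = l.take (l.takeWhile p).length :=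
  List.prefix_iff_eq_take.mp (List.takeWhile_prefix p)

-- B's index loop from position i is the list-structured grouping of the suffix
theorem pvLoopB_eq (tokens : List String) (i : Nat) :
    pvLoopB tokens (tokens.map (fun t => pvKey t)) tokens.length i =
      pvGroup (pvKeyed (tokens.drop i)) := by
  fun_induction pvLoopB with
  | case1 i h j ih =>
    rw [ih]
    have hdrop : tokens.drop i = tokens[i] :: tokens.drop (i + 1) :=
      List.drop_eq_getElem_cons h
    have hget : (tokens.map (fun t => pvKey t)).getD i none = pvKey tokens[i] := by
      simp [List.getD_eq_getElem?_getD, h]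
    have hmapdrop : (tokens.map (fun t => pvKey t)).drop (i + 1) =
        (tokens.drop (i + 1)).map (fun t => pvKey t) := Eq.symm List.map_drop
    rw [hdrop, pvKeyed_cons, pvGroup_cons]
    cases hk : pvKey tokens[i] with
    | none =>
      have hj : j = i + 1 := by
        simp only [j, hget, hk]
        simp
      have hslice : PySem.List.slice tokens (some (i : Int)) (some ((i + 1 : Nat) : Int)) =
          [tokens[i]] := by
        rw [PySem.List.slice_natCast]
        have h1 : i + 1 - i = 1 := by omega
        rw [h1, hdrop]
        rfl
      rw [hj, hslice, pvJoin_cons, pvJoin_nil]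
      simp [pvGroupFrom, pvJoin_nil, String.append_empty]
    | some c =>
      have hlen : tokens.length = (tokens.map (fun t => pvKey t)).length := by simp
      have hj : j = (i + 1) +
          (((tokens.drop (i + 1)).map (fun t => pvKey t)).takeWhile
            (fun x => x == some c)).length := by
        have : j = pvRunEnd (tokens.map (fun t => pvKey t)) tokens.length (some c) (i + 1) := by
          simp only [j, hget, hk]
          simp
        rw [this, hlen, pvRunEnd_eq, hmapdrop]
      rw [List.takeWhile_map] at hj
      set w := (tokens.drop (i + 1)).takeWhile
        (fun t => ((fun x => x == some c) ∘ fun t => pvKey t) t) with hw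
      -- left element: the slice is tokens[i] followed by the run w
      rw [PySem.List.slice_natCast, hdrop]
      have htake : j - i = w.length + 1 := by
        rw [hj]; simp; omega
      rw [htake, List.take_succ_cons]
      have hwtake : (tokens.drop (i + 1)).take w.length = w := by
        rw [hw]; exact (pv_takeWhile_eq_take _ _).symm
      rw [hwtake, pvJoin_cons]
      -- right-hand side: unfold pvGroupFrom at key (some c)
      simp only [pvGroupFrom, pvKeyed]
      rw [List.takeWhile_map]
      have hcomp : ((fun p : String × Option Char => p.2 == some c) ∘ fun t => (t, pvKey t)) =
          ((fun x => x == some c) ∘ fun t => pvKey t) := rfl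
      rw [hcomp, ← hw]
      have hfst : (w.map (fun t => (t, pvKey t))).map Prod.fst = w := by simp [Function.comp_def]
      rw [hfst]
      -- tails: drop j tokens = drop w.length (drop (i+1) tokens)
      have hdropj : tokens.drop j = (tokens.drop (i + 1)).drop w.length := by
        have hlen2 : j = w.length + (i + 1) := by rw [hj]; simp; omega
        rw [List.drop_drop, hlen2]
        have : w.length + (i + 1) = i + 1 + w.length := by omega
        rw [this]
      rw [hdropj]
      simp [List.map_drop]
  | case2 i h =>
    rw [List.drop_eq_nil_of_le (by omega), pvKeyed]
    simp [pvGroup_nil]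

-- B equals the list-structured grouping of the whole keyed list
theorem pvAlt_eq (tokens : List String) :
    ignore_variations_alt tokens = pvGroup (pvKeyed tokens) := by
  unfold ignore_variations_alt
  rw [pvLoopB_eq]
  rfl

-- ===== VERDICT (by name: the statement is the Claim_ definition above) =====
theorem ignore_variations_spec : Claim_equal_ignore_variations := by
  intro tokens _
  unfold Spec_ignore_variations
  rw [pvAlt_eq]
  cases tokens with
  | nil => simp [ignore_variations, pvKeyed, pvGroup_nil]
  | cons t r =>
    unfold ignore_variations
    rw [List.foldl_cons]
    have hstep : pvStepA ([], none) t = ([] ++ [t], some (PySem.Set.ofList t.toList)) := rfl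
    rw [hstep, pvMain, ← pvKey_eq]
    simp only [List.nil_append]
    rw [pvKeyed_cons, pvGroup_cons]
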